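-- pv_equiv track=rewrite | github.com/HedgehogInTheMist/CodeWars | HQ9.py | HQ9
-- ===== SOURCE A (Python) =====
-- def HQ9(code: str) -> str:
--     def compose_lyrics():
--         lyrics, repetetive_verses, final_verses = "", "", ""
--         for amount in range(99, 2, -1):
--             repetetive_verses += f"{amount} bottles of beer on the wall, {amount} bottles of beer.\nTake one down and pass it around, {amount - 1} bottles of beer on the wall.\n"
--         final_verses += "2 bottles of beer on the wall, 2 bottles of beer.\nTake one down and pass it around, 1 bottle of beer on the wall.\n1 bottle of beer on the wall, 1 bottle of beer.\nTake one down and pass it around, no more bottles of beer on the wall.\nNo more bottles of beer on the wall, no more bottles of beer.\nGo to the store and buy some more, 99 bottles of beer on the wall."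
--         lyrics = repetetive_verses + final_verses
--         return lyrics
--
--     interpretation = {
--         'H': 'Hello World!',
--         'Q': 'Q',
--         '9': compose_lyrics()
--     }
--     return interpretation.get(code, None)
-- ===== SOURCE B (Python) =====
-- def HQ9(code: str) -> str:
--     table = {'H': _hello, 'Q': _quine, '9': _song}
--     action = table.get(code)
--     return action() if action is not None else None
--
--
-- def _hello() -> str:
--     return 'Hello World!'
--
--
-- def _quine() -> str:
--     return 'Q'
--
--
-- def _bottles(n: int) -> str:
--     if n == 0:
--         return "no more bottles"
--     if n == 1:
--         return "1 bottle"
--     return f"{n} bottles"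
--
--
-- def _song() -> str:
--     verses = [f"{_bottles(n)} of beer on the wall, {_bottles(n)} of beer.\n"
--               f"Take one down and pass it around, {_bottles(n - 1)} of beer on the wall."
--               for n in range(1, 100)]
--     verses.reverse()
--     verses.append("No more bottles of beer on the wall, no more bottles of beer.\n"
--                   "Go to the store and buy some more, 99 bottles of beer on the wall.")
--     return "\n".join(verses)
-- ===== Notes on version B (the rewrite author's own statement) =====
-- stated objective: alternative
-- what changed: B dispatches lazily via a table of thunks (no song built for 'H'/'Q') and builds the song the opposite way round: an ascending list comprehension of uniform verses for 1..99, reversed, with the no-more verse appended, joined by newlines - instead of A's descending string-concatenation loop plus a hardcoded five-line tail literal.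
import Mathlib
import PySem

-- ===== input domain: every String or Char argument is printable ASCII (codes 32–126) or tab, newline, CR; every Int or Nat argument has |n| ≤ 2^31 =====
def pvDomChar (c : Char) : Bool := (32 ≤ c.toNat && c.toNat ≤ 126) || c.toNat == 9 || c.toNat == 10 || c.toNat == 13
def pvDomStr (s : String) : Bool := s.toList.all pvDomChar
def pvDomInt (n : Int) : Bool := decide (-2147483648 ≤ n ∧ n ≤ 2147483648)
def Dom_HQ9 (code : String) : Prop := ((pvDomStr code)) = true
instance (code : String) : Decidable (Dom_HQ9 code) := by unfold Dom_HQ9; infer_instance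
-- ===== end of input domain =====

-- B dispatches via a table of thunks (the song is only built when requested) and builds the song
-- the opposite way round: ascending verse list 1..99, reversed, no-more verse appended, joined by
-- newlines — instead of A's descending concatenation loop plus a hardcoded tail (objective: alternative).


-- ===== PORT A =====
-- compose_lyrics: the 99→3 loop accumulating repetetive_verses, then the hardcoded final verses.
def pvComposeLyrics : String :=
  let repetetive_verses : String :=
    (PySem.List.pyRange 99 2 (-1)).foldl
      (fun s amount =>
        s ++ (PySem.Int.toStr amount ++ " bottles of beer on the wall, " ++
              PySem.Int.toStr amount ++
              " bottles of beer.\nTake one down and pass it around, " ++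
              PySem.Int.toStr (amount - 1) ++ " bottles of beer on the wall.\n")) ""
  let final_verses : String :=
    "" ++ "2 bottles of beer on the wall, 2 bottles of beer.\nTake one down and pass it around, 1 bottle of beer on the wall.\n1 bottle of beer on the wall, 1 bottle of beer.\nTake one down and pass it around, no more bottles of beer on the wall.\nNo more bottles of beer on the wall, no more bottles of beer.\nGo to the store and buy some more, 99 bottles of beer on the wall."
  repetetive_verses ++ final_verses

def HQ9 (code : String) : Option String :=
  let interpretation : PySem.Dict String String :=
    PySem.Dict.ofList [("H", "Hello World!"), ("Q", "Q"), ("9", pvComposeLyrics)]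
  interpretation.get? code

-- ===== PORT B =====
def pvHello : Unit → String := fun _ => "Hello World!"
def pvQuine : Unit → String := fun _ => "Q"

def pvBottles (n : Int) : String :=
  if n == 0 then "no more bottles"
  else if n == 1 then "1 bottle"
  else PySem.Int.toStr n ++ " bottles"

-- one uniform verse for count n ≥ 1 (no trailing newline; the join supplies separators)
def pvVerse (n : Int) : String :=
  pvBottles n ++ " of beer on the wall, " ++ pvBottles n ++
  " of beer.\nTake one down and pass it around, " ++ pvBottles (n - 1) ++
  " of beer on the wall."

def pvSong : Unit → String := fun _ =>
  let verses := (PySem.List.pyRange 1 100 1).map pvVerse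
  let verses := verses.reverse
  let verses := verses ++ ["No more bottles of beer on the wall, no more bottles of beer.\nGo to the store and buy some more, 99 bottles of beer on the wall."]
  PySem.Str.join "\n" verses

def HQ9_alt (code : String) : Option String :=
  let table : PySem.Dict String (Unit → String) :=
    PySem.Dict.ofList [("H", pvHello), ("Q", pvQuine), ("9", pvSong)]
  match table.get? code with
  | some action => some (action ())
  | none => none

-- ===== PRECONDITION & SPEC =====
def Spec_HQ9 (code : String) (out : Option String) : Prop := out = HQ9_alt code
instance (code : String) (out : Option String) : Decidable (Spec_HQ9 code out) := by unfold Spec_HQ9; infer_instance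

-- ===== CLAIM (what is proved, stated in full; the proofs are below) =====
def Claim_equal_HQ9 : Prop := ∀ (code : String), Dom_HQ9 code → Spec_HQ9 code (HQ9 code)

-- ===== LEMMAS AND PROOFS =====

-- String-level recursion for join on a list with at least two elements
lemma pv_join_cons_cons (sep p q : String) (rest : List String) :
    PySem.Str.join sep (p :: q :: rest) = p ++ sep ++ PySem.Str.join sep (q :: rest) := by
  simp [PySem.Str.join, PySem.Chars.join_cons_cons, String.append_assoc]

lemma pv_join_singleton (sep p : String) : PySem.Str.join sep [p] = p := by
  simp [PySem.Str.join, PySem.Chars.join_singleton]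

lemma pv_join_cons_ne (sep p : String) (rest : List String) (h : rest ≠ []) :
    PySem.Str.join sep (p :: rest) = p ++ sep ++ PySem.Str.join sep rest := by
  cases rest with
  | nil => exact absurd rfl h
  | cons q r => exact pv_join_cons_cons sep p q r

-- joining verses with "\n" and a closing verse = left fold appending "verse ++ \n", then the closing verse
lemma pv_join_eq_foldl (fin : String) :
    ∀ (l : List Int) (init : String),
      init ++ PySem.Str.join "\n" (l.map pvVerse ++ [fin]) =
      l.foldl (fun s n => s ++ (pvVerse n ++ "\n")) init ++ fin := by
  intro l
  induction l with
  | nil => intro init; simp [pv_join_singleton]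
  | cons x l ih =>
      intro init
      have hne : l.map pvVerse ++ [fin] ≠ [] := by simp
      rw [List.map_cons, List.cons_append, pv_join_cons_ne "\n" _ _ hne]
      have := ih (init ++ (pvVerse x ++ "\n"))
      simp only [List.foldl_cons]
      rw [← this]
      simp [String.append_assoc]

-- the reversed ascending range 1..99 is the countdown 99..1
lemma pv_rev_range : ((PySem.List.pyRange 1 100 1).reverse) = PySem.List.pyRange 99 0 (-1) := by
  rw [PySem.List.pyRange_neg_one_eq_reverse]; norm_num

-- the countdown 99..1 is A's countdown 99..3 followed by 2, 1
lemma pv_range_split :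
    PySem.List.pyRange 99 0 (-1) = PySem.List.pyRange 99 2 (-1) ++ [2, 1] := by
  decide

-- on 2 < n the uniform verse (plus its separator newline) is exactly A's repetitive verse
lemma pv_verse_eq_rep (n : Int) (h3 : 2 < n) :
    pvVerse n ++ "\n" =
      PySem.Int.toStr n ++ " bottles of beer on the wall, " ++
      PySem.Int.toStr n ++ " bottles of beer.\nTake one down and pass it around, " ++
      PySem.Int.toStr (n - 1) ++ " bottles of beer on the wall.\n" := by
  have b0 : (n == 0) = false := by simp; omega
  have b1 : (n == 1) = false := by simp; omega
  have c0 : (n - 1 == 0) = false := by simp; omega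
  have c1 : (n - 1 == 1) = false := by simp; omega
  simp [pvVerse, pvBottles, b0, b1, c0, c1, String.append_assoc]

-- B's verses for 2 and 1 plus the closing verse are exactly A's hardcoded final verses
lemma pv_tail_eq :
    pvVerse 2 ++ ("\n" ++ (pvVerse 1 ++ ("\n" ++ "No more bottles of beer on the wall, no more bottles of beer.\nGo to the store and buy some more, 99 bottles of beer on the wall."))) =
      "2 bottles of beer on the wall, 2 bottles of beer.\nTake one down and pass it around, 1 bottle of beer on the wall.\n1 bottle of beer on the wall, 1 bottle of beer.\nTake one down and pass it around, no more bottles of beer on the wall.\nNo more bottles of beer on the wall, no more bottles of beer.\nGo to the store and buy some more, 99 bottles of beer on the wall." := by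
  have h2 : PySem.Int.toStr 2 = "2" := rfl
  simp [pvVerse, pvBottles, h2]

lemma pv_song_eq : pvSong () = pvComposeLyrics := by
  show PySem.Str.join "\n"
      ((((PySem.List.pyRange 1 100 1).map pvVerse).reverse) ++
        ["No more bottles of beer on the wall, no more bottles of beer.\nGo to the store and buy some more, 99 bottles of beer on the wall."]) = _
  rw [← List.map_reverse, pv_rev_range]
  have h0 : PySem.Str.join "\n"
      ((PySem.List.pyRange 99 0 (-1)).map pvVerse ++
        ["No more bottles of beer on the wall, no more bottles of beer.\nGo to the store and buy some more, 99 bottles of beer on the wall."]) =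
      (PySem.List.pyRange 99 0 (-1)).foldl (fun s n => s ++ (pvVerse n ++ "\n")) "" ++
        "No more bottles of beer on the wall, no more bottles of beer.\nGo to the store and buy some more, 99 bottles of beer on the wall." := by
    have := pv_join_eq_foldl
        "No more bottles of beer on the wall, no more bottles of beer.\nGo to the store and buy some more, 99 bottles of beer on the wall."
        (PySem.List.pyRange 99 0 (-1)) ""
    simpa using this
  rw [h0, pv_range_split, List.foldl_append]
  have hcongr :
      List.foldl (fun s n => s ++ (pvVerse n ++ "\n")) "" (PySem.List.pyRange 99 2 (-1)) =
      List.foldl (fun s amount =>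
        s ++ (PySem.Int.toStr amount ++ " bottles of beer on the wall, " ++
              PySem.Int.toStr amount ++
              " bottles of beer.\nTake one down and pass it around, " ++
              PySem.Int.toStr (amount - 1) ++ " bottles of beer on the wall.\n")) ""
        (PySem.List.pyRange 99 2 (-1)) := by
    apply PySem.List.foldl_congr_mem
    intro s n hn
    rw [PySem.List.mem_pyRange_neg_one] at hn
    rw [pv_verse_eq_rep n hn.1]
  rw [hcongr]
  simp only [List.foldl_cons, List.foldl_nil]
  rw [pvComposeLyrics]
  simp only [String.append_assoc]
  rw [pv_tail_eq]
  simp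

-- ===== VERDICT (by name: the statement is the Claim_ definition above) =====
theorem HQ9_spec : Claim_equal_HQ9 := by
  intro code _
  unfold Spec_HQ9 HQ9 HQ9_alt
  by_cases hH : code = "H"
  · simp [hH, PySem.Dict.ofList, PySem.Dict.update, PySem.Dict.get?_insert, pvHello]
  · by_cases hQ : code = "Q"
    · simp [hQ, PySem.Dict.ofList, PySem.Dict.update, PySem.Dict.get?_insert, pvQuine]
    · by_cases h9 : code = "9"
      · simp [h9, PySem.Dict.ofList, PySem.Dict.update, pv_song_eq]
      · simp [PySem.Dict.ofList, PySem.Dict.update, PySem.Dict.get?_insert,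
          PySem.Dict.get?_empty, hH, hQ, h9]
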